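-- pv_equiv track=rewrite | github.com/mzakariaz/side-projects | mathematics/python/kuratowski_decomposition_string.py | kuratowski_decomposition_string
-- ===== SOURCE A (Python) =====
-- def kuratowski_decomposition_string(array):
--     assert isinstance(array, list) or isinstance(array, tuple), "function argument must be of type list or tuple"
--     array = list(array)
--     n = len(array)
--     for i in range(n):
--         if isinstance(array[i], list) or isinstance(array[i], tuple):
--             array[i] = kuratowski_decomposition_string(array[i])
--         else:
--             pass
--     if n == 1:
--         x = array[0]
--         l = "{"
--         r = "}"
--         return f"{l}{l}{x}{r}{r}"
--     elif n == 2: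
--         x = array[0]
--         y = array[-1]
--         l = "{"
--         r = "}"
--         s = f"{l}{l}{x}{r}, {l}{x}, {y}{r}{r}"
--         return s
--     else:
--         v = array[:-1]
--         y = array[-1]
--         return kuratowski_decomposition_string([kuratowski_decomposition_string(v), y])
-- ===== SOURCE B (Python) =====
-- def _pair(x, y):
--     return "{{" + f"{x}" + "}, {" + f"{x}" + ", " + f"{y}" + "}}"
--
-- def kuratowski_decomposition_string(array):
--     assert isinstance(array, (list, tuple)), "function argument must be of type list or tuple"
--     items = [kuratowski_decomposition_string(v) if isinstance(v, (list, tuple)) else v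
--              for v in array]
--     if len(items) == 1:
--         return "{{" + f"{items[0]}" + "}}"
--     acc = _pair(items[0], items[1])
--     for i in range(2, len(items)):
--         acc = _pair(acc, items[i])
--     return acc
-- ===== Notes on version B (the rewrite author's own statement) =====
-- stated objective: simpler
-- what changed: Replaces A's double recursion (recurse on the init, then recurse again on a freshly built 2-element list) by one pair(x,y) formatting helper and a single left-to-right iterative fold acc = pair(acc, item).
import Mathlib
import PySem

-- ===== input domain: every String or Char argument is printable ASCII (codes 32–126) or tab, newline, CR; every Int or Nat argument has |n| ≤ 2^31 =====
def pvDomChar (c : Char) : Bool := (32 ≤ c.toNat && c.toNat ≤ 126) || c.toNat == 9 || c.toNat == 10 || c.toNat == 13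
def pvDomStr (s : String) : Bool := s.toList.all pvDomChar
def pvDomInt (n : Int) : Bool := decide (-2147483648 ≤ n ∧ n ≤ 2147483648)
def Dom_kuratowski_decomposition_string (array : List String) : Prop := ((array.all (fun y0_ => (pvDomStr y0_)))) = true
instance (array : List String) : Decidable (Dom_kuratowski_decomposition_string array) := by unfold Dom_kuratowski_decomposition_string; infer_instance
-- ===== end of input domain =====

-- B replaces A's double recursion by one pair helper and an iterative left fold; objective: simpler.
-- On the empty list both A and B raise IndexError, so Pre_ excludes it.
-- Elements are List String here, so A's nested-list decomposition loop is the identity and is ported as such.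

-- ===== PORT A =====
-- A: n=1 → "{{x}}"; n=2 → "{{x}, {x, y}}"; n≥3 → recurse on init, then on [that, last].
def kuratowski_decomposition_string (array : List String) : String :=
  match array with
  | [] => ""   -- Python raises IndexError here (array[-1]); excluded by Pre_
  | [x] => "{" ++ "{" ++ x ++ "}" ++ "}"
  | [x, y] => "{" ++ "{" ++ x ++ "}" ++ ", " ++ "{" ++ x ++ ", " ++ y ++ "}" ++ "}"
  | a :: b :: c :: rest =>
      -- v = array[:-1]; y = array[-1]; return kur([kur(v), y])
      let l := a :: b :: c :: rest
      kuratowski_decomposition_string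
        [kuratowski_decomposition_string l.dropLast, l.getLast (by simp [l])]
termination_by array.length
decreasing_by
  · simp
  · simp

-- ===== PORT B =====
def pvPair (x y : String) : String :=
  "{" ++ "{" ++ x ++ "}" ++ ", " ++ "{" ++ x ++ ", " ++ y ++ "}" ++ "}"

def kuratowski_decomposition_string_alt (array : List String) : String :=
  match array with
  | [] => ""   -- Python raises IndexError here (items[0]); excluded by Pre_
  | [x] => "{" ++ "{" ++ x ++ "}" ++ "}"
  | x :: y :: rest => rest.foldl pvPair (pvPair x y)

-- ===== PRECONDITION & SPEC =====
-- Pre_ excludes exactly the empty list, on which A (and B) raise IndexError.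
def Pre_kuratowski_decomposition_string (array : List String) : Prop := array ≠ []
instance (array : List String) : Decidable (Pre_kuratowski_decomposition_string array) := by
  unfold Pre_kuratowski_decomposition_string; infer_instance
def pvWitness_kuratowski_decomposition_string : List String := ["a", "b", "c"]

def Spec_kuratowski_decomposition_string (array : List String) (out : String) : Prop := out = kuratowski_decomposition_string_alt array
instance (array : List String) (out : String) : Decidable (Spec_kuratowski_decomposition_string array out) := by unfold Spec_kuratowski_decomposition_string; infer_instance

-- ===== CLAIM (what is proved, stated in full; the proofs are below) =====
def Claim_equal_kuratowski_decomposition_string : Prop := ∀ (array : List String), Dom_kuratowski_decomposition_string array → Pre_kuratowski_decomposition_string array → Spec_kuratowski_decomposition_string array (kuratowski_decomposition_string array)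

-- ===== LEMMAS AND PROOFS =====

-- A on a two-element list is exactly the pair form.
theorem kur_two (x y : String) :
    kuratowski_decomposition_string [x, y] = pvPair x y := by
  simp [kuratowski_decomposition_string, pvPair]

-- Appending one element to a list of length ≥ 2 wraps A's result in a pair with it.
theorem kur_concat (l : List String) (z : String) (h : 2 ≤ l.length) :
    kuratowski_decomposition_string (l ++ [z]) =
      pvPair (kuratowski_decomposition_string l) z := by
  match l, h with
  | a :: b :: t, _ =>
    cases t with
    | nil => simp [kuratowski_decomposition_string, kur_two]
    | cons c u =>
      rw [show (a :: b :: (c :: u)) ++ [z] = a :: b :: c :: (u ++ [z]) by simp]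
      conv_lhs => rw [kuratowski_decomposition_string]
      rw [kur_two]
      congr 2
      · rw [show a :: b :: c :: (u ++ [z]) = (a :: b :: c :: u) ++ [z] by simp,
            List.dropLast_concat]
      · simp

-- A on x :: y :: rest equals the left fold of pvPair.
theorem kur_fold (rest : List String) (x y : String) :
    kuratowski_decomposition_string (x :: y :: rest) =
      rest.foldl pvPair (pvPair x y) := by
  induction rest using List.reverseRecOn with
  | nil => simp [kur_two]
  | append_singleton t z ih =>
    rw [show x :: y :: (t ++ [z]) = (x :: y :: t) ++ [z] by simp,
        kur_concat _ _ (by simp), ih, List.foldl_append]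
    simp

-- ===== VERDICT (by name: the statement is the Claim_ definition above) =====
theorem kuratowski_decomposition_string_spec : Claim_equal_kuratowski_decomposition_string := by
  intro array _ hpre
  unfold Spec_kuratowski_decomposition_string
  match array with
  | [] => exact absurd rfl hpre
  | [x] => simp [kuratowski_decomposition_string, kuratowski_decomposition_string_alt]
  | x :: y :: rest =>
    rw [kur_fold]
    rfl
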